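-- pv_equiv track=rewrite | github.com/phy1um/pushyvm | compile.py | encode_2byte
-- ===== SOURCE A (Python) =====
-- MAX_2B = 2**16 - 1
--
-- def encode_2byte(t):
--     enc_tape = []
--     for b in t:
--         if not isinstance(b, int):
--             raise Exception("All values on tape must be integers")
--         if b > MAX_2B:
--             raise Exception("All values on tape must be 2bytes max")
--         if b < 0:
--             raise Exception("Negative numbers not currently supported")
--         enc_tape.append(b)
--     return enc_tape
-- ===== SOURCE B (Python) =====
-- MAX_2B = 2**16 - 1
--
-- def encode_2byte(t):
--     # Materialize first, then validate with three staged aggregate checks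
--     # (any/max/min) instead of per-element branching; return the copy.
--     out = list(t)
--     if not all(isinstance(b, int) for b in out):
--         raise Exception("All values on tape must be integers")
--     if out and max(out) > MAX_2B:
--         raise Exception("All values on tape must be 2bytes max")
--     if out and min(out) < 0:
--         raise Exception("Negative numbers not currently supported")
--     return out
-- ===== Notes on version B (the rewrite author's own statement) =====
-- stated objective: alternative
-- what changed: A validates element-by-element while appending to an accumulator; B copies the whole input once and then validates it with three whole-list aggregate checks (all isinstance, max(out) > MAX_2B, min(out) < 0), returning the copy unchanged.
import Mathlib
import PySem

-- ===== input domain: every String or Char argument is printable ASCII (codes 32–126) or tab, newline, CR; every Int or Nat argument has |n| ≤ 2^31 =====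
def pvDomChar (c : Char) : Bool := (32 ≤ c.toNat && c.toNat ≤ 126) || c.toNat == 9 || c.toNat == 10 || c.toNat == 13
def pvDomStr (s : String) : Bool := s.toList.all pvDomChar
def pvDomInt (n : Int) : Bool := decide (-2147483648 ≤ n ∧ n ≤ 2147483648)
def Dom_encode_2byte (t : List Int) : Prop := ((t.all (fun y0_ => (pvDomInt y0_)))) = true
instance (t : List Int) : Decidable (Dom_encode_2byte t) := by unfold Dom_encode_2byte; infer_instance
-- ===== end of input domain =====

-- B copies the input once and validates it with whole-list aggregate checks (max/min)
-- instead of A's per-element branching loop; equivalence is about the RETURN value.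

-- ===== PORT A =====
-- A: one loop that checks each b (isinstance always true for Int) and appends it to enc_tape.
-- Where Python raises (b > 65535 or b < 0) the port stops appending; those inputs are outside Pre_.
def encode_2byte (t : List Int) : List Int :=
  t.foldl (fun enc_tape b =>
    if b > 65535 then enc_tape           -- Python: raise (excluded by Pre_)
    else if b < 0 then enc_tape          -- Python: raise (excluded by Pre_)
    else enc_tape ++ [b]) []

-- ===== PORT B =====
-- B: out = list(t); isinstance check is vacuous on Int; then two aggregate checks
-- via max(out)/min(out) (PySem.List.max?/min?), each a raise (outside Pre_); return out.
def encode_2byte_alt (t : List Int) : List Int :=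
  let out := t
  if (PySem.List.max? out (fun x => x)).getD 0 > 65535 then out   -- Python: raise (excluded by Pre_)
  else if (PySem.List.min? out (fun x => x)).getD 0 < 0 then out  -- Python: raise (excluded by Pre_)
  else out

-- ===== PRECONDITION & SPEC =====
-- Pre_ excludes exactly the inputs on which A raises: any element > 65535 or < 0.
def Pre_encode_2byte (t : List Int) : Prop :=
  (t.all (fun b => decide (0 ≤ b ∧ b ≤ 65535))) = true
instance (t : List Int) : Decidable (Pre_encode_2byte t) := by unfold Pre_encode_2byte; infer_instance
def pvWitness_encode_2byte : List Int := [0, 42, 65535]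

def Spec_encode_2byte (t : List Int) (out : List Int) : Prop := out = encode_2byte_alt t
instance (t : List Int) (out : List Int) : Decidable (Spec_encode_2byte t out) := by unfold Spec_encode_2byte; infer_instance

-- ===== CLAIM =====
def Claim_equal_encode_2byte : Prop := ∀ (t : List Int), Dom_encode_2byte t → Pre_encode_2byte t → Spec_encode_2byte t (encode_2byte t)

-- ===== LEMMAS AND PROOFS =====
theorem encode_2byte_foldl (t : List Int) (acc : List Int)
    (h : ∀ b ∈ t, 0 ≤ b ∧ b ≤ 65535) :
    t.foldl (fun enc_tape b =>
      if b > 65535 then enc_tape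
      else if b < 0 then enc_tape
      else enc_tape ++ [b]) acc = acc ++ t := by
  induction t generalizing acc with
  | nil => simp
  | cons b rest ih =>
    have hb := h b (by simp)
    simp only [List.foldl]
    rw [if_neg (by omega), if_neg (by omega), ih _ (fun x hx => h x (by simp [hx]))]
    simp

theorem encode_2byte_alt_id (t : List Int) : encode_2byte_alt t = t := by
  show (if _ then t else if _ then t else t) = t
  split_ifs <;> rfl

-- ===== VERDICT =====
theorem encode_2byte_spec : Claim_equal_encode_2byte := by
  intro t _ hpre
  have h : ∀ b ∈ t, 0 ≤ b ∧ b ≤ 65535 := by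
    intro b hb
    simpa using (List.all_eq_true.mp hpre) b hb
  unfold Spec_encode_2byte
  rw [encode_2byte_alt_id]
  simpa using encode_2byte_foldl t [] h
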